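-- pv_equiv track=rewrite | github.com/rogerbinns/apsw | apsw/fts.py | shingle
-- ===== SOURCE A (Python) =====
-- def shingle(token: str, size: int = 3) -> tuple[str, ...]:
--     """Returns the token into sequences of ``size`` substrings
--
--     For example ``hello`` size 3 becomes ``('hel', 'ell', 'llo')``.
--
--     This is useful when calculating token closeness as the shingles
--     are more representative of word pronunciation and meaning than
--     individual letters.
--     """
--     if (size) < 1:
--         raise ValueError(f"size { size } should be at least 1")
--     if len(token) < 1:
--         raise ValueError("Can't shingle empty token")
--     if len(token) <= size:
--         return (token,)
--     return tuple(token[n : n + size] for n in range(0, len(token) - size + 1))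
-- ===== SOURCE B (Python) =====
-- def shingle(token: str, size: int = 3) -> tuple[str, ...]:
--     if (size) < 1:
--         raise ValueError(f"size { size } should be at least 1")
--     if len(token) < 1:
--         raise ValueError("Can't shingle empty token")
--     if len(token) <= size:
--         return (token,)
--     out = []
--     s = token
--     while len(s) >= size:
--         out.append(s[:size])
--         s = s[1:]
--     return tuple(out)
-- ===== Notes on version B (the rewrite author's own statement) =====
-- stated objective: alternative
-- what changed: Replaces the index-range comprehension over start positions with a while loop that walks the suffixes of the token, emitting the size-prefix of each suffix and dropping one character per step.
import Mathlib
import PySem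

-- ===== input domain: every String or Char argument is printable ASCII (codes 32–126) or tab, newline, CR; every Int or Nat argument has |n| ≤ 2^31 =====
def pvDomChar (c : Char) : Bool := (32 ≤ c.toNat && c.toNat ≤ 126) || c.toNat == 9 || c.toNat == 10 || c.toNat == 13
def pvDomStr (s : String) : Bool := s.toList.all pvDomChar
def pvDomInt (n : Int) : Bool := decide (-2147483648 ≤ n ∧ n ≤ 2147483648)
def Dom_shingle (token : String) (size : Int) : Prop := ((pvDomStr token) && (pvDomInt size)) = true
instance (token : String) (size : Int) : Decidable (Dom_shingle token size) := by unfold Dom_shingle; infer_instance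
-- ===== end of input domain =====

-- B replaces A's index-range comprehension by a while loop that repeatedly takes the size-prefix of
-- the remaining suffix and drops one character (objective: alternative decomposition, same cost).

-- ===== PORT A =====
def shingle (token : String) (size : Int) : List String :=
  if size < 1 then []                                  -- Python: raise ValueError (excluded by Pre_)
  else if PySem.Str.len token < 1 then []              -- Python: raise ValueError (excluded by Pre_)
  else if PySem.Str.len token ≤ size then [token]
  else (PySem.List.pyRange 0 (PySem.Str.len token - size + 1) 1).map
    (fun n => PySem.Str.slice token (some n) (some (n + size)))

-- ===== PORT B =====
-- the while loop of Source B: s runs over the suffixes of the token (s = s[1:] each turn),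
-- emitting s[:size] while len(s) >= size
def shingleSuffixes (size : Nat) : List Char → List String
  | [] => []
  | c :: rest =>
    if size ≤ rest.length + 1 then
      String.ofList (PySem.Chars.slice (c :: rest) none (some (size : Int))) :: shingleSuffixes size rest
    else []

def shingle_alt (token : String) (size : Int) : List String :=
  if size < 1 then []                                  -- Python: raise ValueError (excluded by Pre_)
  else if PySem.Str.len token < 1 then []              -- Python: raise ValueError (excluded by Pre_)
  else if PySem.Str.len token ≤ size then [token]
  else shingleSuffixes size.toNat token.toList

-- ===== PRECONDITION & SPEC =====
-- Pre_ excludes exactly the inputs where the Python raises ValueError: size < 1 or an empty token.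
def Pre_shingle (token : String) (size : Int) : Prop := 1 ≤ size ∧ token ≠ ""
instance (token : String) (size : Int) : Decidable (Pre_shingle token size) := by
  unfold Pre_shingle; infer_instance

def pvWitness_shingle : String × Int := ("hello", 3)

def Spec_shingle (token : String) (size : Int) (out : List String) : Prop := out = shingle_alt token size
instance (token : String) (size : Int) (out : List String) : Decidable (Spec_shingle token size out) := by
  unfold Spec_shingle; infer_instance

-- ===== CLAIM (what is proved, stated in full; the proofs are below) =====
def Claim_equal_shingle : Prop := ∀ (token : String) (size : Int), Dom_shingle token size → Pre_shingle token size → Spec_shingle token size (shingle token size)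

-- ===== LEMMAS AND PROOFS =====

-- the suffix walk emits exactly the slices l[n : n+k] for n = 0 .. l.length - k
lemma shingleSuffixes_eq (k : Nat) (hk : 1 ≤ k) :
    ∀ l : List Char, k ≤ l.length →
      shingleSuffixes k l
        = (List.range (l.length - k + 1)).map (fun n => String.ofList ((l.drop n).take k)) := by
  intro l
  induction l with
  | nil => intro h; simp at h; omega
  | cons c rest ih =>
    intro h
    simp only [List.length_cons] at h ⊢
    rw [shingleSuffixes]
    rw [if_pos h]
    have hslice : PySem.Chars.slice (c :: rest) none (some (k : Int)) = (c :: rest).take k := by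
      rw [PySem.Chars.slice_eq_listSlice, PySem.List.slice_to_natCast]
    by_cases hle : k ≤ rest.length
    · rw [ih hle, hslice]
      have h3 : rest.length + 1 - k + 1 = (rest.length - k + 1) + 1 := by omega
      rw [h3, List.range_succ_eq_map (n := rest.length - k + 1)]
      simp [List.map_map, Function.comp_def, Nat.succ_eq_add_one]
    · have hkr : k = rest.length + 1 := by omega
      have hrest : shingleSuffixes k rest = [] := by
        cases rest with
        | nil => rfl
        | cons c' r' =>
          rw [shingleSuffixes]
          rw [if_neg (by simp at hkr ⊢; omega)]
      have : rest.length + 1 - k + 1 = 1 := by omega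
      rw [hrest, hslice, this]
      simp

lemma slice_str_eq (token : String) (k j : Nat) :
    PySem.Str.slice token (some (j : Int)) (some ((j : Int) + (k : Int)))
      = String.ofList ((token.toList.drop j).take k) := by
  apply String.toList_inj.mp
  rw [PySem.Str.toList_slice, PySem.Chars.slice_eq_listSlice, PySem.List.slice_natCast_add]
  simp

-- ===== VERDICT (by name: the statement is the Claim_ definition above) =====
theorem shingle_spec : Claim_equal_shingle := by
  intro token size _ hpre
  obtain ⟨hsz, hne⟩ := hpre
  unfold Spec_shingle shingle shingle_alt
  have hlen : PySem.Str.len token = (token.toList.length : Int) := PySem.Str.len_eq token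
  have hpos : 1 ≤ token.toList.length := by
    rcases Nat.eq_zero_or_pos token.toList.length with h0 | h1
    · exact absurd (by simpa using String.toList_inj.mp (by simpa [List.length_eq_zero_iff] using h0)) hne
    · exact h1
  rw [hlen]
  have h1 : ¬ (size < 1) := by omega
  have h2 : ¬ ((token.toList.length : Int) < 1) := by omega
  simp only [if_neg h1, if_neg h2]
  by_cases hle : (token.toList.length : Int) ≤ size
  · simp only [if_pos hle]
  · simp only [if_neg hle]
    have hk : size = (size.toNat : Int) := by omega
    have hklen : size.toNat ≤ token.toList.length := by omega
    rw [shingleSuffixes_eq size.toNat (by omega) token.toList hklen]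
    rw [PySem.List.pyRange_one]
    have hcount : ((token.toList.length : Int) - size + 1 - 0).toNat
        = token.toList.length - size.toNat + 1 := by omega
    rw [hcount, List.map_map]
    apply List.map_congr_left
    intro j _
    simp only [Function.comp_apply]
    have hz : (0 : Int) + (j : Int) = (j : Int) := by ring
    rw [hz, hk]
    exact slice_str_eq token size.toNat j
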